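-- pv_equiv track=rewrite | github.com/ChunBoo/JustUK | 242-maxNumberOfWords.py | f
-- ===== SOURCE A (Python) =====
-- def f(s,brokens):
--     b=set(brokens)
--     arr=s.split(" ")
--     ans=0
--     for s in arr:
--         if all( i not in b for i in s):
--             ans+=1
--
--     return  ans
-- ===== SOURCE B (Python) =====
-- def f(s, brokens):
--     b = set(brokens)
--     ans = 0
--     valid = True
--     for c in s:
--         if c == ' ':
--             if valid:
--                 ans += 1
--             valid = True
--         else:
--             valid = valid and c not in b
--     if valid:
--         ans += 1
--     return ans
-- ===== Notes on version B (the rewrite author's own statement) =====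
-- stated objective: alternative
-- what changed: Replaces split(' ') plus a per-word inner all(...) scan with a single pass over the characters of s maintaining a 'current token is valid' flag, emitting a count at each space and once at the end; no word list is ever built.
import Mathlib
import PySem

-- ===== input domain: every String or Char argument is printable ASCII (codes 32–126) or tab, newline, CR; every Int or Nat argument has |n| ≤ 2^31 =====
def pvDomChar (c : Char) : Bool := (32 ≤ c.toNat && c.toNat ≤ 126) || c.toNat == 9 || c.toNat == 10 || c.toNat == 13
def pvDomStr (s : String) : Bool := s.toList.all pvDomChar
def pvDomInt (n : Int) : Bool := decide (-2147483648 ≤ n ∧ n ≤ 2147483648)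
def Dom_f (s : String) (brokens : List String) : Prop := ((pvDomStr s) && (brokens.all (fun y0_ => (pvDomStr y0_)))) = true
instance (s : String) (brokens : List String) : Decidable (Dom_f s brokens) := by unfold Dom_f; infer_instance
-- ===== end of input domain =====

-- B replaces split(" ")+per-word scan by one character pass with a validity flag; alternative decomposition, same cost.


-- ===== PORT A =====
-- b=set(brokens); arr=s.split(" "); ans=0; for w in arr: if all(i not in b for i in w): ans+=1
def f (s : String) (brokens : List String) : Int :=
  let b := PySem.Set.ofList brokens
  let arr := (PySem.Chars.splitOn s.toList [' ']).map String.ofList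
  arr.foldl (fun ans w =>
    if w.toList.all (fun i => !(PySem.Set.contains b (String.ofList [i]))) then ans + 1 else ans) 0

-- ===== PORT B =====
-- single pass: at a space count the pending token if valid and reset; otherwise update the flag
def f_alt (s : String) (brokens : List String) : Int :=
  let b := PySem.Set.ofList brokens
  let st := s.toList.foldl
    (fun (st : Int × Bool) c =>
      if c = ' ' then (st.1 + (if st.2 then 1 else 0), true)
      else (st.1, st.2 && !(PySem.Set.contains b (String.ofList [c])))) (0, true)
  st.1 + (if st.2 then 1 else 0)

-- ===== PRECONDITION & SPEC =====
def Spec_f (s : String) (brokens : List String) (out : Int) : Prop := out = f_alt s brokens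
instance (s : String) (brokens : List String) (out : Int) : Decidable (Spec_f s brokens out) := by unfold Spec_f; infer_instance

-- ===== CLAIM (what is proved, stated in full; the proofs are below) =====
def Claim_equal_f : Prop := ∀ (s : String) (brokens : List String), Dom_f s brokens → Spec_f s brokens (f s brokens)

-- ===== LEMMAS AND PROOFS =====

-- character validity test shared by both readings
def okc (b : PySem.Set String) (c : Char) : Bool := !(PySem.Set.contains b (String.ofList [c]))

-- A's count of a word list
def cnt (b : PySem.Set String) (ws : List (List Char)) : Int :=
  (ws.map (fun w => if w.all (okc b) then (1 : Int) else 0)).sum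

-- B's remaining count given the current flag
def gB (b : PySem.Set String) : List Char → Bool → Int
  | [], v => if v then 1 else 0
  | c :: rest, v =>
      if c = ' ' then (if v then 1 else 0) + gB b rest true
      else gB b rest (v && okc b c)
termination_by structural l _ => l

theorem cnt_append (b : PySem.Set String) (xs ys : List (List Char)) :
    cnt b (xs ++ ys) = cnt b xs + cnt b ys := by
  simp [cnt]

theorem cnt_singleton (b : PySem.Set String) (w : List Char) :
    cnt b [w] = if w.all (okc b) then (1:Int) else 0 := by
  unfold cnt
  simp only [List.map_cons, List.map_nil, List.sum_cons, List.sum_nil, add_zero]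

theorem go_zero_nil (cur : List Char) (acc : List (List Char)) :
    PySem.Chars.splitOn.go [' '] 0 [] cur acc = ((cur.reverse ++ []) :: acc).reverse := rfl

theorem go_succ_nil (n : Nat) (cur : List Char) (acc : List (List Char)) :
    PySem.Chars.splitOn.go [' '] (n+1) [] cur acc = (cur.reverse :: acc).reverse := rfl

theorem go_succ_space (n : Nat) (rest cur : List Char) (acc : List (List Char)) :
    PySem.Chars.splitOn.go [' '] (n+1) (' '::rest) cur acc
      = PySem.Chars.splitOn.go [' '] n rest [] (cur.reverse :: acc) := by
  simp [PySem.Chars.splitOn.go, List.isPrefixOf]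

theorem go_succ_char (n : Nat) (c : Char) (rest cur : List Char) (acc : List (List Char))
    (hc : ¬ c = ' ') :
    PySem.Chars.splitOn.go [' '] (n+1) (c::rest) cur acc
      = PySem.Chars.splitOn.go [' '] n rest (c::cur) acc := by
  have hpre : ([' '] : List Char).isPrefixOf (c :: rest) = false := by
    simp [List.isPrefixOf]; exact fun h => hc h.symm
  simp [PySem.Chars.splitOn.go, hpre]

theorem foldlA_eq (b : PySem.Set String) (ws : List (List Char)) : ∀ (init : Int),
    (ws.map String.ofList).foldl (fun ans w =>
      if w.toList.all (fun i => !(PySem.Set.contains b (String.ofList [i]))) then ans + 1 else ans)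
      init = init + cnt b ws := by
  induction ws with
  | nil => simp [cnt]
  | cons w rest ih =>
    intro init
    simp only [List.map_cons, List.foldl_cons]
    rw [ih]
    have hl : (String.ofList w).toList = w := by simp
    have hfun : (fun i => !(PySem.Set.contains b (String.ofList [i]))) = okc b := rfl
    rw [hl, hfun]
    simp only [cnt, List.map_cons, List.sum_cons]
    cases h : w.all (okc b) <;>
      simp only [Bool.false_eq_true, if_false, if_true] <;> ring

theorem go_eq (b : PySem.Set String) (l : List Char) : ∀ (fuel : Nat) (cur : List Char)
    (acc : List (List Char)), l.length ≤ fuel →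
    cnt b (PySem.Chars.splitOn.go [' '] fuel l cur acc)
      = cnt b acc.reverse + gB b l (cur.all (okc b)) := by
  induction l with
  | nil =>
    intro fuel cur acc _
    cases fuel with
    | zero =>
      rw [go_zero_nil, List.append_nil, List.reverse_cons, cnt_append, cnt_singleton,
          List.all_reverse]
      simp only [gB]
    | succ n =>
      rw [go_succ_nil, List.reverse_cons, cnt_append, cnt_singleton, List.all_reverse]
      simp only [gB]
  | cons c rest ih =>
    intro fuel cur acc hf
    cases fuel with
    | zero => simp at hf
    | succ n =>
      simp only [List.length_cons, Nat.add_le_add_iff_right] at hf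
      by_cases hc : c = ' '
      · subst hc
        rw [go_succ_space, ih n [] (cur.reverse :: acc) hf]
        rw [List.reverse_cons, cnt_append, cnt_singleton, List.all_reverse, List.all_nil]
        simp only [gB]
        rw [if_pos trivial]
        ring
      · rw [go_succ_char n c rest cur acc hc, ih n (c :: cur) acc hf]
        simp only [gB, List.all_cons]
        rw [Bool.and_comm]
        simp [hc]

theorem foldlB_eq (b : PySem.Set String) (l : List Char) : ∀ (ans : Int) (v : Bool),
    (let st := l.foldl
      (fun (st : Int × Bool) c =>
        if c = ' ' then (st.1 + (if st.2 then 1 else 0), true)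
        else (st.1, st.2 && !(PySem.Set.contains b (String.ofList [c])))) (ans, v)
     st.1 + (if st.2 then 1 else 0)) = ans + gB b l v := by
  induction l with
  | nil => intro ans v; simp [gB]
  | cons c rest ih =>
    intro ans v
    by_cases hc : c = ' '
    · subst hc
      simp only [List.foldl_cons, if_true, gB]
      rw [ih]
      ring
    · simp only [List.foldl_cons, gB, if_neg hc]
      rw [ih]
      rfl

-- ===== VERDICT (by name: the statement is the Claim_ definition above) =====
theorem f_spec : Claim_equal_f := by
  intro s brokens _
  unfold Spec_f f f_alt
  simp only []
  rw [foldlA_eq, foldlB_eq]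
  unfold PySem.Chars.splitOn
  rw [go_eq _ _ _ _ _ (by omega)]
  simp [cnt]
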